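-- pv_equiv track=rewrite | github.com/KimiGets0FPS/Learn-Python | Homework/Week 41+42 HW/closing_in_sum.py | closing_in_sum
-- ===== SOURCE A (Python) =====
-- def closing_in_sum(number):
--     """
--     >>> closing_in_sum(12321)
--     36
--     >>> closing_in_sum(1039)
--     22
--     """
--     output = 0
--     # INDEX
--     first_number = 0  # Whatever this number is, it's going to be multiplied by 100.
--     second_number = -1  # This number will stay the same.
--     number_list = list(str(number))
--     if len(number_list) % 2 != 0:
--         output += int(number_list[len(number_list)//2])
--     for _ in range(len(number_list)//2):
--         number_list[first_number] = int(number_list[first_number])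
--         number_list[second_number] = int(number_list[second_number])
--         number_list[first_number] *= 10
--         number_list[first_number] += number_list[second_number]
--         output += number_list[first_number]
--         first_number += 1
--         second_number -= 1
--     return output
-- ===== SOURCE B (Python) =====
-- def closing_in_sum(number):
--     s = str(number)
--     n = len(s)
--     half = n // 2
--     total = 10 * sum(int(c) for c in s[:half]) + sum(int(c) for c in s[half + n % 2:])
--     if n % 2:
--         total += int(s[half])
--     return total
-- ===== Notes on version B (the rewrite author's own statement) =====
-- stated objective: simpler
-- what changed: Replaces the inward-pairing loop with in-place list mutation and a twin index pair by two independent half-digit summations (ten times the first half plus the second half, plus the middle digit when odd), exploiting that each outer digit contributes a factor of ten and each inner digit a factor of one.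
import Mathlib
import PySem

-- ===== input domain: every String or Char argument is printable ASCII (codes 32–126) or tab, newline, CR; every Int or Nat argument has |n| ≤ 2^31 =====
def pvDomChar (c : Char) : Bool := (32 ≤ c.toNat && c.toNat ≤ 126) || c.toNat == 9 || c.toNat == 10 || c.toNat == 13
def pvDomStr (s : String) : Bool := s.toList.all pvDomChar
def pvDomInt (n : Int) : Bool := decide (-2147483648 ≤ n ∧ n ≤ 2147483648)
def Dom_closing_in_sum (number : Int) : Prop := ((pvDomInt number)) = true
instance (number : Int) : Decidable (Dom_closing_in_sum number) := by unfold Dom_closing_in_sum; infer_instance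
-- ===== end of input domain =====

-- B replaces A's inward-pairing loop (with in-place list mutation) by two independent
-- half-digit summations; same cost, plainly shorter (objective: simpler).


-- ===== PORT A =====
-- int(c) for a single character c; total form (getD 0): Pre_ guarantees c is a digit
def pvDint (c : Char) : Int := (PySem.Int.ofChars? [c]).getD 0

-- a Python list cell that holds either a still-unconverted character or an int
inductive PvCell
  | ch : Char → PvCell
  | iv : Int → PvCell
deriving DecidableEq, Repr

-- int(cell): the value if already an int, else int(character)
def pvCellInt : PvCell → Int
  | .ch c => pvDint c
  | .iv v => v

-- one iteration of A's for-loop on the state (output, number_list, first_number, second_number)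
def pvBodyA (st : Int × List PvCell × Int × Int) : Int × List PvCell × Int × Int :=
  let (out, lst, f, s) := st
  let lst := PySem.List.pySetD lst f (.iv (pvCellInt (PySem.List.pyGetD lst f (.iv 0))))
  let lst := PySem.List.pySetD lst s (.iv (pvCellInt (PySem.List.pyGetD lst s (.iv 0))))
  let lst := PySem.List.pySetD lst f (.iv (pvCellInt (PySem.List.pyGetD lst f (.iv 0)) * 10))
  let lst := PySem.List.pySetD lst f
    (.iv (pvCellInt (PySem.List.pyGetD lst f (.iv 0)) + pvCellInt (PySem.List.pyGetD lst s (.iv 0))))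
  let out := out + pvCellInt (PySem.List.pyGetD lst f (.iv 0))
  (out, lst, f + 1, s - 1)

def closing_in_sum (number : Int) : Int :=
  let number_list : List PvCell := (PySem.Int.toChars number).map PvCell.ch
  let n : Int := number_list.length
  let output : Int :=
    if PySem.Int.mod n 2 ≠ 0 then
      pvCellInt (PySem.List.pyGetD number_list (PySem.Int.floordiv n 2) (.iv 0))
    else 0
  let st := (PySem.List.pyRange 0 (PySem.Int.floordiv n 2) 1).foldl
    (fun st _ => pvBodyA st) (output, number_list, 0, -1)
  st.1

-- ===== PORT B =====
def closing_in_sum_alt (number : Int) : Int :=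
  let s : List Char := PySem.Int.toChars number
  let n : Int := s.length
  let half : Int := PySem.Int.floordiv n 2
  let total : Int :=
    10 * ((PySem.List.slice s none (some half)).map pvDint).sum
      + ((PySem.List.slice s (some (half + PySem.Int.mod n 2)) none).map pvDint).sum
  if PySem.Int.mod n 2 ≠ 0 then total + pvDint (PySem.List.pyGetD s half '0') else total

-- ===== PRECONDITION & SPEC =====
-- Pre_ excludes negative numbers: there str(number) starts with '-' and Python's int('-') raises ValueError in both A and B.
def Pre_closing_in_sum (number : Int) : Prop := 0 ≤ number
instance (number : Int) : Decidable (Pre_closing_in_sum number) := by unfold Pre_closing_in_sum; infer_instance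
def pvWitness_closing_in_sum : Int := (12321)

def Spec_closing_in_sum (number : Int) (out : Int) : Prop := out = closing_in_sum_alt number
instance (number : Int) (out : Int) : Decidable (Spec_closing_in_sum number out) := by unfold Spec_closing_in_sum; infer_instance

-- ===== CLAIM (what is proved, stated in full; the proofs are below) =====
def Claim_equal_closing_in_sum : Prop := ∀ (number : Int), Dom_closing_in_sum number → Pre_closing_in_sum number → Spec_closing_in_sum number (closing_in_sum number)

-- ===== LEMMAS AND PROOFS =====
-- the digit value A and B read at position j of the digit string
def pvD (cs : List Char) (j : Nat) : Int := pvDint (cs.getD j '0')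

lemma pvSetD_neg {α : Type} (xs : List α) (k : Nat) (v : α) (h1 : 0 < k) (h2 : k ≤ xs.length) :
    PySem.List.pySetD xs (-(k : Int)) v = xs.set (xs.length - k) v := by
  have h0 : k ≠ 0 := by omega
  have h3 : -(xs.length : Int) ≤ -(k : Int) := by omega
  simp [PySem.List.pySetD, PySem.List.pySet?, PySem.List.pyIdx?, h0, h3]

lemma pvGetD_set_ne {α : Type} (l : List α) (i j : Nat) (v d : α) (h : i ≠ j) :
    (l.set i v).getD j d = l.getD j d := by
  simp [List.getD_eq_getElem?_getD, List.getElem?_set_ne h]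

lemma pvGetD_set_self {α : Type} (l : List α) (k : Nat) (v d : α) (h : k < l.length) :
    (l.set k v).getD k d = v := by
  simp [List.getD_eq_getElem?_getD, h]

-- what one iteration of A's loop does at counter i (reads hit still-unconverted chars)
lemma pvBodyA_eq (cs : List Char) (lst : List PvCell) (i : Nat) (out : Int)
    (hlen : lst.length = cs.length) (h2 : 2 * (i + 1) ≤ cs.length)
    (hinv : ∀ k, i ≤ k → k < cs.length - i → lst.getD k (.iv 0) = .ch (cs.getD k '0')) :
    pvBodyA (out, lst, ((i : Nat) : Int), -(((1 + i : Nat)) : Int)) =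
      (out + (pvD cs i * 10 + pvD cs (cs.length - 1 - i)),
       (((lst.set i (.iv (pvD cs i))).set (cs.length - 1 - i)
          (.iv (pvD cs (cs.length - 1 - i)))).set i (.iv (pvD cs i * 10))).set i
          (.iv (pvD cs i * 10 + pvD cs (cs.length - 1 - i))),
       (((i + 1 : Nat)) : Int), -(((1 + (i + 1) : Nat)) : Int)) := by
  have hn : cs.length = lst.length := hlen.symm
  set n := cs.length with hndef
  have hij : i ≠ n - 1 - i := by omega
  have e1 : PySem.List.pyGetD lst ((i : Nat) : Int) (.iv 0) = .ch (cs.getD i '0') :=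
    (PySem.List.pyGetD_natCast lst i _).trans (hinv i le_rfl (by omega))
  have l1 : (lst.set i (PvCell.iv (pvDint (cs.getD i '0')))).length = n := by simp [hlen]
  have e2 : PySem.List.pyGetD (lst.set i (.iv (pvDint (cs.getD i '0')))) (-(((1 + i : Nat)) : Int)) (.iv 0)
      = .ch (cs.getD (n - 1 - i) '0') := by
    rw [PySem.List.pyGetD_neg_natCast _ (1 + i) _ (by omega) (by omega)]
    rw [← List.getD_eq_getElem _ (PvCell.iv 0) (by omega)]
    have : (lst.set i (PvCell.iv (pvDint (cs.getD i '0')))).length - (1 + i) = n - 1 - i := by omega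
    rw [this, pvGetD_set_ne _ _ _ _ _ hij]
    exact hinv (n - 1 - i) (by omega) (by omega)
  simp only [pvD]
  simp only [pvBodyA]
  rw [e1]
  rw [show PySem.List.pySetD lst ((i : Nat) : Int) (PvCell.iv (pvCellInt (PvCell.ch (cs.getD i '0'))))
      = lst.set i (.iv (pvDint (cs.getD i '0'))) from by simp [PySem.List.pySetD_natCast, pvCellInt]]
  rw [e2]
  rw [pvSetD_neg _ (1 + i) _ (by omega) (by omega)]
  rw [show (lst.set i (PvCell.iv (pvDint (cs.getD i '0')))).length - (1 + i) = n - 1 - i by omega]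
  simp only [pvCellInt, PySem.List.pyGetD_natCast, PySem.List.pySetD_natCast]
  rw [pvGetD_set_ne _ _ _ _ _ (Ne.symm hij)]
  rw [pvGetD_set_self lst i (PvCell.iv (pvDint (cs.getD i '0'))) (PvCell.iv 0) (by omega)]
  rw [pvGetD_set_self ((lst.set i (PvCell.iv (pvDint (cs.getD i '0')))).set (n - 1 - i) (PvCell.iv (pvDint (cs.getD (n - 1 - i) '0'))))
      i (PvCell.iv (pvDint (cs.getD i '0') * 10)) (PvCell.iv 0) (by simp; omega)]
  rw [PySem.List.pyGetD_neg_natCast (((lst.set i (PvCell.iv (pvDint (cs.getD i '0')))).set (n - 1 - i)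
      (PvCell.iv (pvDint (cs.getD (n - 1 - i) '0')))).set i (PvCell.iv (pvDint (cs.getD i '0') * 10))) (1 + i) (PvCell.iv 0)
      (by omega) (by simp; omega)]
  rw [← List.getD_eq_getElem _ (PvCell.iv 0) (by simp; omega)]
  rw [show (((lst.set i (PvCell.iv (pvDint (cs.getD i '0')))).set (n - 1 - i)
      (PvCell.iv (pvDint (cs.getD (n - 1 - i) '0')))).set i (PvCell.iv (pvDint (cs.getD i '0') * 10))).length - (1 + i) = n - 1 - i
      by simp; omega]
  rw [pvGetD_set_ne _ _ _ _ _ hij]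
  rw [pvGetD_set_self (lst.set i (PvCell.iv (pvDint (cs.getD i '0')))) (n - 1 - i)
      (PvCell.iv (pvDint (cs.getD (n - 1 - i) '0'))) (PvCell.iv 0) (by simp; omega)]
  rw [pvGetD_set_self (((lst.set i (PvCell.iv (pvDint (cs.getD i '0')))).set (n - 1 - i)
      (PvCell.iv (pvDint (cs.getD (n - 1 - i) '0')))).set i (PvCell.iv (pvDint (cs.getD i '0') * 10))) i
      (PvCell.iv (pvDint (cs.getD i '0') * 10 + pvDint (cs.getD (n - 1 - i) '0'))) (PvCell.iv 0) (by simp; omega)]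
  simp only [Prod.mk.injEq]
  refine ⟨trivial, trivial, by push_cast; ring, by push_cast; ring⟩

-- A's loop invariant: starting at counter i with the middle of the list untouched,
-- running r more iterations adds the r inward pair values to out.
lemma pvLoopA (cs : List Char) : ∀ (L : List Int) (i : Nat) (out : Int) (lst : List PvCell),
    lst.length = cs.length →
    i + L.length ≤ cs.length / 2 →
    (∀ k, i ≤ k → k < cs.length - i → lst.getD k (.iv 0) = .ch (cs.getD k '0')) →
    (L.foldl (fun st _ => pvBodyA st) (out, lst, ((i : Nat) : Int), -(((1 + i : Nat)) : Int))).1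
      = out + ∑ j ∈ Finset.range L.length, (pvD cs (i + j) * 10 + pvD cs (cs.length - 1 - (i + j))) := by
  intro L
  induction L with
  | nil => intro i out lst _ _ _; simp
  | cons x T ih =>
    intro i out lst hlen hle hinv
    simp only [List.length_cons] at hle
    rw [List.foldl_cons]
    rw [pvBodyA_eq cs lst i out hlen (by omega) hinv]
    rw [ih (i + 1) (out + (pvD cs i * 10 + pvD cs (cs.length - 1 - i))) _ (by simp [hlen]) (by omega)
      (by
        intro k hk1 hk2
        rw [pvGetD_set_ne _ _ _ _ _ (by omega), pvGetD_set_ne _ _ _ _ _ (by omega),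
          pvGetD_set_ne _ _ _ _ _ (by omega), pvGetD_set_ne _ _ _ _ _ (by omega)]
        exact hinv k (by omega) (by omega))]
    have hsum : ∑ j ∈ Finset.range (T.length + 1), (pvD cs (i + j) * 10 + pvD cs (cs.length - 1 - (i + j)))
        = (pvD cs i * 10 + pvD cs (cs.length - 1 - i))
          + ∑ j ∈ Finset.range T.length, (pvD cs ((i + 1) + j) * 10 + pvD cs (cs.length - 1 - ((i + 1) + j))) := by
      rw [Finset.sum_range_succ' (fun j => pvD cs (i + j) * 10 + pvD cs (cs.length - 1 - (i + j)))]
      simp only [add_zero]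
      rw [add_comm]
      congr 1
      exact Finset.sum_congr rfl (fun j _ => by rw [show i + (j + 1) = (i + 1) + j from by omega])
    simp only [List.length_cons, hsum]
    ring

lemma pvSumMap (l : List Char) : (l.map pvDint).sum = ∑ j ∈ Finset.range l.length, pvDint (l.getD j '0') := by
  induction l with
  | nil => simp
  | cons x t ih => simp [Finset.sum_range_succ', ih, add_comm]

-- A's loop started from the initial state, with the map-converted char list
lemma pvLoopA0 (cs : List Char) (L : List Int) (out : Int) (hL : L.length ≤ cs.length / 2) :
    (L.foldl (fun st _ => pvBodyA st) (out, cs.map PvCell.ch, 0, -1)).1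
      = out + ∑ j ∈ Finset.range L.length, (pvD cs j * 10 + pvD cs (cs.length - 1 - j)) := by
  have h := pvLoopA cs L 0 out (cs.map PvCell.ch) (by simp) (by omega) (fun k hk1 hk2 => by
    rw [List.getD_eq_getElem _ _ (by simp; omega), List.getElem_map,
      List.getD_eq_getElem _ _ (by omega)])
  simpa using h

lemma pvTakeSum (cs : List Char) :
    ((cs.take (cs.length / 2)).map pvDint).sum = ∑ j ∈ Finset.range (cs.length / 2), pvD cs j := by
  rw [pvSumMap]
  rw [show (cs.take (cs.length / 2)).length = cs.length / 2 from by simp; omega]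
  refine Finset.sum_congr rfl (fun j hj => ?_)
  have hj' := Finset.mem_range.mp hj
  rw [pvD, List.getD_eq_getElem _ _ (by simp; omega), List.getElem_take,
    List.getD_eq_getElem _ _ (by omega)]

lemma pvDropSum (cs : List Char) :
    ((cs.drop (cs.length / 2 + cs.length % 2)).map pvDint).sum
      = ∑ k ∈ Finset.range (cs.length / 2), pvD cs (cs.length / 2 + cs.length % 2 + k) := by
  rw [pvSumMap]
  rw [show (cs.drop (cs.length / 2 + cs.length % 2)).length = cs.length / 2 from by simp; omega]
  refine Finset.sum_congr rfl (fun k hk => ?_)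
  have hk' := Finset.mem_range.mp hk
  rw [pvD, List.getD_eq_getElem _ _ (by simp; omega), List.getElem_drop,
    List.getD_eq_getElem _ _ (by omega)]

lemma pvReflSum (cs : List Char) :
    ∑ j ∈ Finset.range (cs.length / 2), pvD cs (cs.length - 1 - j)
      = ∑ k ∈ Finset.range (cs.length / 2), pvD cs (cs.length / 2 + cs.length % 2 + k) := by
  rw [← Finset.sum_range_reflect (fun k => pvD cs (cs.length / 2 + cs.length % 2 + k))]
  refine Finset.sum_congr rfl (fun j hj => ?_)
  have hj' := Finset.mem_range.mp hj
  rw [show cs.length / 2 + cs.length % 2 + (cs.length / 2 - 1 - j) = cs.length - 1 - j from by omega]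

-- ===== VERDICT (by name: the statement is the Claim_ definition above) =====
theorem closing_in_sum_spec : Claim_equal_closing_in_sum := by
  intro number _ _
  unfold Spec_closing_in_sum closing_in_sum closing_in_sum_alt
  set cs := PySem.Int.toChars number with hcs
  set n := cs.length with hn
  have hmod : PySem.Int.mod ((n : Nat) : Int) 2 = ((n % 2 : Nat) : Int) := by
    rw [PySem.Int.mod_eq_emod_of_pos (by omega)]; omega
  have hdiv : PySem.Int.floordiv ((n : Nat) : Int) 2 = ((n / 2 : Nat) : Int) := by
    rw [PySem.Int.floordiv_eq_ediv_of_pos (by omega)]; omega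
  simp only [List.length_map, ← hn, hmod, hdiv]
  have hrange : (PySem.List.pyRange 0 ((n / 2 : Nat) : Int) 1).length = n / 2 := by
    rw [PySem.List.length_pyRange_one]; omega
  rw [pvLoopA0 cs _ _ (by rw [hrange])]
  rw [hrange]
  rw [PySem.List.slice_to_natCast]
  rw [show ((n / 2 : Nat) : Int) + ((n % 2 : Nat) : Int) = ((n / 2 + n % 2 : Nat) : Int) from by push_cast; ring]
  rw [PySem.List.slice_from_natCast]
  rw [pvTakeSum, pvDropSum, Finset.sum_add_distrib, pvReflSum]
  by_cases hodd : n % 2 = 0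
  · simp only [hodd, Nat.cast_zero, ne_eq, not_true_eq_false, if_false]
    rw [← Finset.sum_mul]
    ring
  · have hne : ((n % 2 : Nat) : Int) ≠ 0 := by omega
    simp only [hne, ne_eq, not_false_eq_true, if_true]
    have hlt : n / 2 < n := by omega
    rw [PySem.List.pyGetD_natCast, PySem.List.pyGetD_natCast,
      List.getD_eq_getElem _ _ (by simp; omega), List.getElem_map]
    rw [show pvCellInt (PvCell.ch cs[n / 2]) = pvD cs (n / 2) from by
      rw [pvCellInt, pvD, List.getD_eq_getElem _ _ hlt]]
    rw [pvD, List.getD_eq_getElem _ _ hlt, ← Finset.sum_mul]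
    ring
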